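-- pv_equiv track=rewrite | github.com/migberbay/AoC2023 | days/day10.py | get_starting_pipe
-- ===== SOURCE A (Python) =====
-- def get_starting_pipe(initial_pos_state):
--     dirs = ['up', 'down', 'left', 'right']
--     idxs = [i for i, x in enumerate(initial_pos_state.values()) if x == -1]
--     non_valid = set([dirs[i] for i in idxs])
--     v = set(dirs)-non_valid
--
--     if len(v.intersection({'down', 'up'})) == 2:
--         return'|'
--
--     if len(v.intersection({'left', 'right'})) == 2:
--         return'-'
--
--     if len(v.intersection({'right', 'up'})) == 2:
--         return'L'
--
--     if len(v.intersection({'left', 'up'})) == 2: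
--         return'J'
--
--     if len(v.intersection({'left', 'down'})) == 2:
--         return'7'
--
--     if len(v.intersection({'right', 'down'})) == 2:
--         return'F'
-- ===== SOURCE B (Python) =====
-- SHAPES = {
--     3: '|', 7: '|', 11: '|', 15: '|',
--     12: '-', 13: '-', 14: '-',
--     9: 'L', 5: 'J', 6: '7', 10: 'F',
-- }
--
-- def get_starting_pipe(initial_pos_state):
--     mask = 15  # all four directions valid until marked otherwise
--     for bit, x in zip((1, 2, 4, 8), initial_pos_state.values()):
--         if x == -1:
--             mask -= bit
--     return SHAPES.get(mask)
-- ===== Notes on version B (the rewrite author's own statement) =====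
-- stated objective: alternative
-- what changed: A builds Python sets (enumerate the values, index into the direction list, set difference, six intersection-cardinality if-branches); B folds the values into a 4-bit validity mask and returns the shape with a single lookup in a precomputed 11-entry mask-to-shape table. Pre_ excludes the inputs where A raises IndexError (a -1 value at dict position >= 4) and those where A falls off the if-chain and returns None, which is not a value of the declared str type; B also returns None there.
-- outside the precondition, e.g. on get_starting_pipe({'up': -1, 'down': -1, 'left': -1, 'right': 0}): A returns None, B returns None
import Mathlib
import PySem

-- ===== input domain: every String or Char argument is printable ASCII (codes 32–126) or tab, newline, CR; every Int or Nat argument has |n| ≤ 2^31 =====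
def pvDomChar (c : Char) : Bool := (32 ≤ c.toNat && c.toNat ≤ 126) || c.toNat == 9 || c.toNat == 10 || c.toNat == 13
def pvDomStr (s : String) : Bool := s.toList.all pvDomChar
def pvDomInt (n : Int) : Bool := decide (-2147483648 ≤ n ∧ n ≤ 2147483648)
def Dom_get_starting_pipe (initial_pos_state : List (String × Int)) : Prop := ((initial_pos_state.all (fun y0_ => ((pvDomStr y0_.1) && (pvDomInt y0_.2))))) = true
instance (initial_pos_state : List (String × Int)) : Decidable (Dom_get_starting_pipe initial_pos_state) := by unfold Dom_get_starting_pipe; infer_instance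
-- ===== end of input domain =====

-- B replaces A's set arithmetic (enumerate → index list → set difference → six intersection-length
-- if-branches) with a 4-bit validity mask folded over the values and one lookup in a precomputed table.


-- ===== PORT A =====
-- dirs = ['up', 'down', 'left', 'right']
def pvDirs : List String := ["up", "down", "left", "right"]

-- idxs = [i for i, x in enumerate(initial_pos_state.values()) if x == -1]
def pvIdxs (vals : List Int) : List Int :=
  ((PySem.List.enumerate vals 0).filter (fun p => p.2 == -1)).map (·.1)

-- non_valid = set([dirs[i] for i in idxs])  — Python's dirs[i] raises IndexError for i ≥ 4;
-- the port's '.getD ""' default is reached exactly there, and Pre_ excludes those inputs.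
def pvNonValid (vals : List Int) : PySem.Set String :=
  PySem.Set.ofList ((pvIdxs vals).map (fun i => (PySem.List.pyGet? pvDirs i).getD ""))

def get_starting_pipe (initial_pos_state : List (String × Int)) : String :=
  let vals := (PySem.Dict.ofList initial_pos_state).values
  let non_valid := pvNonValid vals
  let v := PySem.Set.diff (PySem.Set.ofList pvDirs) non_valid
  if PySem.Set.len (PySem.Set.inter v (PySem.Set.ofList ["down", "up"])) == 2 then "|"
  else if PySem.Set.len (PySem.Set.inter v (PySem.Set.ofList ["left", "right"])) == 2 then "-"
  else if PySem.Set.len (PySem.Set.inter v (PySem.Set.ofList ["right", "up"])) == 2 then "L"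
  else if PySem.Set.len (PySem.Set.inter v (PySem.Set.ofList ["left", "up"])) == 2 then "J"
  else if PySem.Set.len (PySem.Set.inter v (PySem.Set.ofList ["left", "down"])) == 2 then "7"
  else if PySem.Set.len (PySem.Set.inter v (PySem.Set.ofList ["right", "down"])) == 2 then "F"
  else ""  -- Python falls off the end and returns None (not a str); Pre_ excludes these inputs

-- ===== PORT B =====
-- SHAPES = {3:'|',7:'|',11:'|',15:'|',12:'-',13:'-',14:'-',9:'L',5:'J',6:'7',10:'F'}
def pvShapes : PySem.Dict Int String :=
  PySem.Dict.ofList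
    [(3, "|"), (7, "|"), (11, "|"), (15, "|"),
     (12, "-"), (13, "-"), (14, "-"),
     (9, "L"), (5, "J"), (6, "7"), (10, "F")]

def get_starting_pipe_alt (initial_pos_state : List (String × Int)) : String :=
  let vals := (PySem.Dict.ofList initial_pos_state).values
  let mask := (List.zip ([1, 2, 4, 8] : List Int) vals).foldl
    (fun m p => if p.2 == -1 then m - p.1 else m) 15
  (pvShapes.get? mask).getD ""  -- SHAPES.get(mask) is None off the table; Pre_ excludes these inputs

-- ===== PRECONDITION & SPEC =====
-- Pre_ excludes exactly (a) inputs where A raises IndexError (a -1 value at dict position ≥ 4) and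
-- (b) inputs where fewer than two directions are valid, so no branch matches and Python A returns
-- None, which is not a value of the declared return type str.
def Pre_get_starting_pipe (initial_pos_state : List (String × Int)) : Prop :=
  let vals := (PySem.Dict.ofList initial_pos_state).values
  (-1 : Int) ∉ vals.drop 4 ∧
  ((vals[1]? ≠ some (-1) ∧ vals[0]? ≠ some (-1)) ∨
   (vals[2]? ≠ some (-1) ∧ vals[3]? ≠ some (-1)) ∨
   (vals[3]? ≠ some (-1) ∧ vals[0]? ≠ some (-1)) ∨
   (vals[2]? ≠ some (-1) ∧ vals[0]? ≠ some (-1)) ∨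
   (vals[2]? ≠ some (-1) ∧ vals[1]? ≠ some (-1)) ∨
   (vals[3]? ≠ some (-1) ∧ vals[1]? ≠ some (-1)))
instance (initial_pos_state : List (String × Int)) : Decidable (Pre_get_starting_pipe initial_pos_state) := by unfold Pre_get_starting_pipe; infer_instance

def pvWitness_get_starting_pipe : (List (String × Int)) :=
  [("up", -1), ("down", 0), ("left", 3), ("right", -1)]

def Spec_get_starting_pipe (initial_pos_state : List (String × Int)) (out : String) : Prop := out = get_starting_pipe_alt initial_pos_state
instance (initial_pos_state : List (String × Int)) (out : String) : Decidable (Spec_get_starting_pipe initial_pos_state out) := by unfold Spec_get_starting_pipe; infer_instance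

-- ===== CLAIM (what is proved, stated in full; the proofs are below) =====
def Claim_equal_get_starting_pipe : Prop := ∀ (initial_pos_state : List (String × Int)), Dom_get_starting_pipe initial_pos_state → Pre_get_starting_pipe initial_pos_state → Spec_get_starting_pipe initial_pos_state (get_starting_pipe initial_pos_state)

-- ===== LEMMAS AND PROOFS =====

-- membership of direction j's name in A's non_valid set is exactly 'slot j holds -1'
theorem mem_nonvalid (vals : List Int) (j : Nat) (hj : j < 4) :
    ((PySem.List.pyGet? pvDirs (j : Int)).getD "") ∈ pvNonValid vals ↔ vals[j]? = some (-1) := by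
  simp only [pvNonValid, PySem.Set.mem_ofList, List.mem_map, pvIdxs, List.mem_filter,
    PySem.List.mem_enumerate_iff]
  constructor
  · rintro ⟨i, ⟨p, ⟨⟨k, hk, rfl⟩, hp⟩, hpi⟩, heq⟩
    simp only [beq_iff_eq] at hp hpi
    subst hpi
    rcases Nat.lt_or_ge k 4 with hk4 | hk4
    · interval_cases j <;> interval_cases k <;>
        first
          | exact absurd heq (by decide)
          | (rw [List.getElem?_eq_getElem hk]; exact congrArg some hp)
    · exfalso
      have hnone : PySem.List.pyGet? pvDirs (0 + (k : Int)) = none := by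
        simp only [PySem.List.pyGet?, PySem.List.pyIdx?, pvDirs]
        simp
        omega
      rw [hnone] at heq
      interval_cases j <;> exact absurd heq (by decide)
  · intro h
    have hlen : j < vals.length := by
      by_contra hc
      simp [List.getElem?_eq_none (Nat.le_of_not_lt hc)] at h
    have hv : vals[j] = -1 := by
      rw [List.getElem?_eq_getElem hlen] at h
      exact Option.some.inj h
    exact ⟨0 + (j : Int), ⟨(0 + (j : Int), vals[j]), ⟨⟨j, hlen, rfl⟩, by simp [hv]⟩, rfl⟩,
      by norm_num⟩

-- B's folded mask is determined by whether each of the first four slots holds -1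
theorem mask_eq (vals : List Int) :
    (List.zip ([1, 2, 4, 8] : List Int) vals).foldl
      (fun m p => if p.2 == -1 then m - p.1 else m) 15
    = (if vals[0]? = some (-1) then 0 else 1) + (if vals[1]? = some (-1) then 0 else 2)
      + (if vals[2]? = some (-1) then 0 else 4) + (if vals[3]? = some (-1) then 0 else 8) := by
  rcases vals with _ | ⟨a, _ | ⟨b, _ | ⟨c, _ | ⟨d, rest⟩⟩⟩⟩ <;>
    simp only [List.zip, List.zipWith, List.foldl, List.getElem?_cons_zero,
      List.getElem?_cons_succ, List.getElem?_nil, Option.some.injEq, reduceCtorEq] <;>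
    split_ifs <;> simp_all

-- the two ports agree on every input (Pre_ is only needed for the Python side, where A
-- raises IndexError or returns None; both ports are total)
theorem ports_agree (l : List (String × Int)) :
    get_starting_pipe l = get_starting_pipe_alt l := by
  unfold get_starting_pipe get_starting_pipe_alt
  generalize (PySem.Dict.ofList l).values = vals
  have m0 : ("up" ∈ pvNonValid vals) ↔ vals[0]? = some (-1) := mem_nonvalid vals 0 (by omega)
  have m1 : ("down" ∈ pvNonValid vals) ↔ vals[1]? = some (-1) := mem_nonvalid vals 1 (by omega)
  have m2 : ("left" ∈ pvNonValid vals) ↔ vals[2]? = some (-1) := mem_nonvalid vals 2 (by omega)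
  have m3 : ("right" ∈ pvNonValid vals) ↔ vals[3]? = some (-1) := mem_nonvalid vals 3 (by omega)
  simp only [mask_eq]
  by_cases h0 : vals[0]? = some (-1) <;> by_cases h1 : vals[1]? = some (-1) <;>
    by_cases h2 : vals[2]? = some (-1) <;> by_cases h3 : vals[3]? = some (-1) <;>
      simp [PySem.Set.diff, PySem.Set.inter, PySem.Set.len, pvDirs,
        PySem.Set.ofList, PySem.Set.add, PySem.Set.empty, PySem.Set.contains,
        m0, m1, m2, m3, h0, h1, h2, h3, pvShapes, PySem.Dict.ofList] <;> decide

-- ===== VERDICT (by name: the statement is the Claim_ definition above) =====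
theorem get_starting_pipe_spec : Claim_equal_get_starting_pipe := by
  intro l _ _
  exact ports_agree l
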